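-- pv_equiv track=rewrite | github.com/davidemascolo2000/ADM-HM1 | Homework_Mascolo_Davide.py | solve
-- ===== SOURCE A (Python) =====
-- def solve(s):
--     s = s.split(" ")
--     res = ""
--     for i in s:
--         for j in range(0, len(i)):
--             if j == 0:
--                 res += i[0].upper()
--             else:
--                 res += i[j]
--             res += " "
--     return res
-- ===== SOURCE B (Python) =====
-- def solve(s):
--     # One pass over the characters, no split: a boolean flag marks word starts.
--     out = []
--     start = True
--     for ch in s:
--         if ch == " ":
--             start = True
--         else:
--             out.append(ch.upper() if start else ch)
--             out.append(" ")
--             start = False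
--     return "".join(out)
-- ===== Notes on version B (the rewrite author's own statement) =====
-- stated objective: simpler
-- what changed: Replaces A's split-on-space followed by nested index loops over each part with a single linear scan over the characters, using a word-start boolean flag and joining the emitted pieces at the end.
import Mathlib
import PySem

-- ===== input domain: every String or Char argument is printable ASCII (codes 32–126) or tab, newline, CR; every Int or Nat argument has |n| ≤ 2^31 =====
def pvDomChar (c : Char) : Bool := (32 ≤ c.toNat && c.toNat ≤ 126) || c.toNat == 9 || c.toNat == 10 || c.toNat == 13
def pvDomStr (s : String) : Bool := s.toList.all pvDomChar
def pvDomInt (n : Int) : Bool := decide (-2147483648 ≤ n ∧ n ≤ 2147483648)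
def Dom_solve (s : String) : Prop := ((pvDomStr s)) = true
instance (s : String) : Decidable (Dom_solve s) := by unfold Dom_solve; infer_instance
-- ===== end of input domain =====

-- B replaces A's split(" ")-then-index nested loops by a single scan with a word-start flag; same O(n) cost, simpler shape.


-- ===== PORT A =====
-- for i in s.split(" "): for j in range(0, len(i)): res += (i[0].upper() if j == 0 else i[j]); res += " "
def solve (s : String) : String :=
  let parts := (PySem.Chars.split? s.toList [' ']).getD []
  let res : List Char := parts.foldl (fun res i =>
    (PySem.List.pyRange 0 (PySem.Chars.len i) 1).foldl (fun res j =>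
      (if j == 0 then res ++ PySem.Chars.upper [PySem.List.pyGetD i 0 ' ']
       else res ++ [PySem.List.pyGetD i j ' ']) ++ [' ']) res) []
  String.mk res

-- ===== PORT B =====
-- single pass: state = (accumulated chars, word-start flag)
def solve_alt (s : String) : String :=
  let st := s.toList.foldl (fun (acc : List Char × Bool) ch =>
    if ch == ' ' then (acc.1, true)
    else (acc.1 ++ [if acc.2 then PySem.Chars.upperChar ch else ch, ' '], false)) ([], true)
  String.mk st.1

-- ===== PRECONDITION & SPEC =====
def Spec_solve (s : String) (out : String) : Prop := out = solve_alt s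
instance (s : String) (out : String) : Decidable (Spec_solve s out) := by unfold Spec_solve; infer_instance

-- ===== CLAIM (what is proved, stated in full; the proofs are below) =====
def Claim_equal_solve : Prop := ∀ (s : String), Dom_solve s → Spec_solve s (solve s)

-- ===== LEMMAS AND PROOFS =====

-- head word and remaining words of a split on ' '
def splitP : List Char → List Char × List (List Char)
  | [] => ([], [])
  | c :: rest =>
    let p := splitP rest
    if c = ' ' then ([], p.1 :: p.2) else (c :: p.1, p.2)

-- what A emits per character / per word
def pairR (c : Char) : List Char := [c, ' ']

def renderA : List Char → List Char
  | [] => []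
  | c :: rest => PySem.Chars.upperChar c :: ' ' :: rest.flatMap pairR

lemma go_space : ∀ (fuel : Nat) (l cur : List Char) (acc : List (List Char)),
    l.length ≤ fuel →
    PySem.Chars.splitOn.go [' '] fuel l cur acc =
      acc.reverse ++ ((cur.reverse ++ (splitP l).1) :: (splitP l).2) := by
  intro fuel
  induction fuel with
  | zero =>
    intro l cur acc h
    have : l = [] := List.eq_nil_of_length_eq_zero (Nat.le_zero.mp h)
    subst this
    simp [PySem.Chars.splitOn.go, splitP]
  | succ fuel ih =>
    intro l cur acc h
    cases l with
    | nil => simp [PySem.Chars.splitOn.go, splitP]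
    | cons c rest =>
      by_cases hc : c = ' '
      · subst hc
        rw [show PySem.Chars.splitOn.go [' '] (fuel+1) (' ' :: rest) cur acc
              = PySem.Chars.splitOn.go [' '] fuel rest [] (cur.reverse :: acc) by
            simp [PySem.Chars.splitOn.go, List.isPrefixOf]]
        rw [ih rest [] (cur.reverse :: acc) (by simpa using Nat.lt_succ_iff.mp (by simpa using h))]
        simp [splitP]
      · rw [show PySem.Chars.splitOn.go [' '] (fuel+1) (c :: rest) cur acc
              = PySem.Chars.splitOn.go [' '] fuel rest (c :: cur) acc by
            have hp : List.isPrefixOf [' '] (c :: rest) = false := by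
              simp [List.isPrefixOf, Ne.symm hc]
            simp [PySem.Chars.splitOn.go, hp]]
        rw [ih rest (c :: cur) acc (by simpa using Nat.lt_succ_iff.mp (by simpa using h))]
        simp [splitP, hc]

lemma splitOn_space (cs : List Char) :
    PySem.Chars.splitOn cs [' '] = (splitP cs).1 :: (splitP cs).2 := by
  unfold PySem.Chars.splitOn
  rw [go_space (cs.length + 1) cs [] [] (Nat.le_succ _)]
  simp

-- A's inner loop renders one word
lemma inner_loop (w : List Char) (res : List Char) :
    (PySem.List.pyRange 0 (PySem.Chars.len w) 1).foldl (fun res j =>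
      (if j == 0 then res ++ PySem.Chars.upper [PySem.List.pyGetD w 0 ' ']
       else res ++ [PySem.List.pyGetD w j ' ']) ++ [' ']) res = res ++ renderA w := by
  cases w with
  | nil =>
    rw [show PySem.List.pyRange 0 (PySem.Chars.len ([] : List Char)) 1 = [] from
          PySem.List.pyRange_one_eq_nil (by decide)]
    simp [renderA]
  | cons c rest =>
    rw [show PySem.Chars.len (c :: rest) = ((c :: rest).length : Int) from by
          simp [PySem.Chars.len_eq]]
    rw [PySem.List.pyRange_one_cons (by exact_mod_cast Nat.succ_pos rest.length)]
    simp only [List.foldl_cons, beq_self_eq_true, if_true]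
    rw [PySem.List.foldl_congr_mem (PySem.List.pyRange (0+1) ((c :: rest).length : Int))
        _ (fun res j => (fun acc ch => acc ++ pairR ch) res (PySem.List.pyGetD (c :: rest) j ' ')) _
        (by
          intro acc j hj
          have h1 : (1:Int) ≤ j := by simpa using (PySem.List.mem_pyRange_one.mp hj).1
          have hne : (j == (0:Int)) = false := by
            have : j ≠ 0 := by omega
            simpa using this
          simp [hne, pairR])]
    rw [PySem.List.foldl_pyRange_pyGetD' (c :: rest) ' '
          (fun acc ch => acc ++ pairR ch) _ (a := 0+1) (by norm_num)]
    have h0 : PySem.List.pyGetD (c :: rest) 0 ' ' = c := by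
      rw [show (0:Int) = ((0:Nat):Int) from rfl, PySem.List.pyGetD_natCast]
      rfl
    rw [PySem.List.foldl_append_eq_flatMap]
    simp [renderA, h0, PySem.Chars.upper]

-- B's fold, characterised through splitP
lemma b_fold : ∀ (cs : List Char) (acc : List Char) (start : Bool),
    (cs.foldl (fun (acc : List Char × Bool) ch =>
      if ch == ' ' then (acc.1, true)
      else (acc.1 ++ [if acc.2 then PySem.Chars.upperChar ch else ch, ' '], false)) (acc, start)).1
    = acc ++ (if start then renderA (splitP cs).1 else (splitP cs).1.flatMap pairR)
        ++ ((splitP cs).2).flatMap renderA := by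
  intro cs
  induction cs with
  | nil => intro acc start; cases start <;> simp [splitP, renderA]
  | cons c rest ih =>
    intro acc start
    by_cases hc : c = ' '
    · subst hc
      have hb : ((' ':Char) == ' ') = true := rfl
      simp only [List.foldl_cons, hb, if_true]
      rw [ih]
      cases start <;> simp [splitP, renderA]
    · have hb : (c == ' ') = false := by simp [hc]
      simp only [List.foldl_cons, hb, Bool.false_eq_true, if_false]
      rw [ih]
      cases start <;> simp [splitP, hc, renderA, pairR]

lemma solve_eq_alt (s : String) : solve s = solve_alt s := by
  unfold solve solve_alt
  rw [show PySem.Chars.split? s.toList [' '] = some (PySem.Chars.splitOn s.toList [' ']) by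
        simp [PySem.Chars.split?]]
  rw [splitOn_space]
  simp only [Option.getD_some]
  rw [b_fold]
  congr 1
  rw [show ((splitP s.toList).1 :: (splitP s.toList).2)
        = [(splitP s.toList).1] ++ (splitP s.toList).2 by simp]
  rw [List.foldl_append]
  simp only [List.foldl_cons, List.foldl_nil]
  rw [inner_loop]
  have : ∀ (ws : List (List Char)) (init : List Char),
      ws.foldl (fun res i =>
        (PySem.List.pyRange 0 (PySem.Chars.len i) 1).foldl (fun res j =>
          (if j == 0 then res ++ PySem.Chars.upper [PySem.List.pyGetD i 0 ' ']
           else res ++ [PySem.List.pyGetD i j ' ']) ++ [' ']) res) init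
      = init ++ ws.flatMap renderA := by
    intro ws
    induction ws with
    | nil => simp
    | cons w ws ih => intro init; rw [List.foldl_cons, inner_loop, ih]; simp
  rw [this]
  simp

-- ===== VERDICT (by name: the statement is the Claim_ definition above) =====
theorem solve_spec : Claim_equal_solve := by
  intro s _
  unfold Spec_solve
  exact solve_eq_alt s
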